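-- pv_equiv track=rewrite | github.com/LukeSaccius/Research-about-Dickson-Polynomial | scripts/verification/verify_value_sets.py | reversed_dickson_polynomial
-- ===== SOURCE A (Python) =====
-- def reversed_dickson_polynomial(n, x, p):
--     """
--     Compute the REVERSED Dickson polynomial D_n(1, x) mod p.
--
--     This uses the recurrence relation from Test.py:
--     D_0(1, x) = 2
--     D_1(1, x) = 1
--     D_n(1, x) = D_{n-1}(1, x) - x * D_{n-2}(1, x)
--     """
--     if n == 0:
--         return 2 % p
--     if n == 1:
--         return 1 % p
--
--     # Use iterative approach to avoid recursion depth issues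
--     d_prev = 2 % p  # D_0
--     d_curr = 1 % p  # D_1
--
--     for i in range(2, n + 1):
--         d_next = (d_curr - x * d_prev) % p
--         d_prev = d_curr
--         d_curr = d_next
--
--     return d_curr
-- ===== SOURCE B (Python) =====
-- def _mmul(A, B, p):
--     a, b, c, d = A
--     e, f, g, h = B
--     return ((a * e + b * g) % p, (a * f + b * h) % p,
--             (c * e + d * g) % p, (c * f + d * h) % p)
--
--
-- def reversed_dickson_polynomial(n, x, p):
--     """D_n(1, x) mod p via 2x2 matrix exponentiation: O(log n) instead of O(n)."""
--     if n == 0: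
--         return 2 % p
--     # [D_k+1, D_k]^T = M * [D_k, D_k-1]^T with M = [[1, -x], [1, 0]]
--     r = (1 % p, 0, 0, 1 % p)            # identity (mod p)
--     b = (1 % p, (-x) % p, 1 % p, 0)     # M mod p
--     e = n - 1
--     while e > 0:
--         if e % 2 == 1:
--             r = _mmul(r, b, p)
--         b = _mmul(b, b, p)
--         e //= 2
--     # r = M^(n-1) mod p; apply to (D_1, D_0) = (1, 2)
--     return (r[0] * 1 + r[1] * 2) % p
-- ===== Notes on version B (the rewrite author's own statement) =====
-- stated objective: faster
-- what changed: Replaces the O(n) linear-recurrence loop by binary exponentiation of the 2x2 companion matrix [[1,-x],[1,0]] mod p, applied to the seed vector (D_1,D_0)=(1,2).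
import Mathlib
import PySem

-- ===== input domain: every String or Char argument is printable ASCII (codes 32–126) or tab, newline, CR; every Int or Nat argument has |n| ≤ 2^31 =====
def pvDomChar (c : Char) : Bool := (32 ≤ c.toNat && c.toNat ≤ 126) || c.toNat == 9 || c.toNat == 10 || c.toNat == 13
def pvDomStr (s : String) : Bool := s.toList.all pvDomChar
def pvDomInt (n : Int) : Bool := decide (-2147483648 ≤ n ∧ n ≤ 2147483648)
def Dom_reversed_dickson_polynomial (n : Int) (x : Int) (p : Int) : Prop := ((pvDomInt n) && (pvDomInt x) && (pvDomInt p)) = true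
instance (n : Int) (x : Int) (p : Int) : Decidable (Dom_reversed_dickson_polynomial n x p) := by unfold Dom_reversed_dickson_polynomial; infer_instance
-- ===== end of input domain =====

-- B replaces A's O(n) linear-recurrence loop by binary exponentiation of the 2x2
-- companion matrix mod p (O(log n)); proved to return the same value whenever p ≠ 0.


-- ===== PORT A =====
def reversed_dickson_polynomial (n : Int) (x : Int) (p : Int) : Int :=
  if n == 0 then PySem.Int.mod 2 p
  else if n == 1 then PySem.Int.mod 1 p
  else
    -- d_prev, d_curr loop over range(2, n+1)
    let s := (PySem.List.pyRange 2 (n + 1) 1).foldl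
      (fun (st : Int × Int) _ => (st.2, PySem.Int.mod (st.2 - x * st.1) p))
      (PySem.Int.mod 2 p, PySem.Int.mod 1 p)
    s.2

-- ===== PORT B =====
-- 2x2 matrix as (a, b, c, d) = [[a, b], [c, d]]; _mmul of Source B
def pvMMul (A B : Int × Int × Int × Int) (p : Int) : Int × Int × Int × Int :=
  (PySem.Int.mod (A.1 * B.1 + A.2.1 * B.2.2.1) p,
   PySem.Int.mod (A.1 * B.2.1 + A.2.1 * B.2.2.2) p,
   PySem.Int.mod (A.2.2.1 * B.1 + A.2.2.2 * B.2.2.1) p,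
   PySem.Int.mod (A.2.2.1 * B.2.1 + A.2.2.2 * B.2.2.2) p)

-- the 'while e > 0' loop of Source B
def pvPowLoop (p : Int) (r b : Int × Int × Int × Int) (e : Int) : Int × Int × Int × Int :=
  if h : e ≤ 0 then r
  else
    let r' := if PySem.Int.mod e 2 == 1 then pvMMul r b p else r
    pvPowLoop p r' (pvMMul b b p) (PySem.Int.floordiv e 2)
termination_by e.toNat
decreasing_by
  rw [PySem.Int.floordiv_eq_ediv_of_pos (by omega)]
  omega

def reversed_dickson_polynomial_alt (n : Int) (x : Int) (p : Int) : Int :=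
  if n == 0 then PySem.Int.mod 2 p
  else
    let r := pvPowLoop p
      (PySem.Int.mod 1 p, 0, 0, PySem.Int.mod 1 p)
      (PySem.Int.mod 1 p, PySem.Int.mod (-x) p, PySem.Int.mod 1 p, 0)
      (n - 1)
    PySem.Int.mod (r.1 * 1 + r.2.1 * 2) p

-- ===== PRECONDITION & SPEC =====
-- Pre_ excludes exactly p = 0, where the Python A raises ZeroDivisionError.
def Pre_reversed_dickson_polynomial (n : Int) (x : Int) (p : Int) : Prop := p ≠ 0
instance (n : Int) (x : Int) (p : Int) : Decidable (Pre_reversed_dickson_polynomial n x p) := by unfold Pre_reversed_dickson_polynomial; infer_instance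

def pvWitness_reversed_dickson_polynomial : Int × Int × Int := (5, 3, 7)

def Spec_reversed_dickson_polynomial (n : Int) (x : Int) (p : Int) (out : Int) : Prop := out = reversed_dickson_polynomial_alt n x p
instance (n : Int) (x : Int) (p : Int) (out : Int) : Decidable (Spec_reversed_dickson_polynomial n x p out) := by unfold Spec_reversed_dickson_polynomial; infer_instance

-- ===== CLAIM (what is proved, stated in full; the proofs are below) =====
def Claim_equal_reversed_dickson_polynomial : Prop := ∀ (n : Int) (x : Int) (p : Int), Dom_reversed_dickson_polynomial n x p → Pre_reversed_dickson_polynomial n x p → Spec_reversed_dickson_polynomial n x p (reversed_dickson_polynomial n x p)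

-- ===== LEMMAS AND PROOFS =====

-- the pure (un-modded) reversed Dickson sequence D_k(1, x)
def pvD (x : Int) : Nat → Int
  | 0 => 2
  | 1 => 1
  | (k + 2) => pvD x (k + 1) - x * pvD x k

-- congruence bridge: PySem.Int.mod identifies integers that differ by a multiple of p
theorem pvMod_congr {p a b : Int} (hp : p ≠ 0) (h : a ≡ b [ZMOD p]) :
    PySem.Int.mod a p = PySem.Int.mod b p := by
  have ha := PySem.Int.floordiv_mul_add_mod a p
  have hb := PySem.Int.floordiv_mul_add_mod b p
  obtain ⟨k, hk⟩ := Int.ModEq.dvd h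
  have hdvd : p ∣ (PySem.Int.mod b p - PySem.Int.mod a p) :=
    ⟨k - PySem.Int.floordiv b p + PySem.Int.floordiv a p, by linarith [hk, ha, hb]⟩
  have habs : |PySem.Int.mod b p - PySem.Int.mod a p| < |p| := by
    rcases lt_or_gt_of_ne hp with hneg | hpos
    · have h1 := PySem.Int.mod_neg_bounds a hneg
      have h2 := PySem.Int.mod_neg_bounds b hneg
      rw [abs_of_neg hneg, abs_lt]; omega
    · have h1 := PySem.Int.mod_nonneg a hpos
      have h1' := PySem.Int.mod_lt a hpos
      have h2 := PySem.Int.mod_nonneg b hpos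
      have h2' := PySem.Int.mod_lt b hpos
      rw [abs_of_pos hpos, abs_lt]; omega
  have h0 := Int.eq_zero_of_abs_lt_dvd ((abs_dvd p _).mpr hdvd) habs
  omega

theorem pvMod_modEq (a p : Int) : PySem.Int.mod a p ≡ a [ZMOD p] := by
  have h := PySem.Int.floordiv_mul_add_mod a p
  have : p ∣ a - PySem.Int.mod a p := ⟨PySem.Int.floordiv a p, by linarith⟩
  exact (Int.modEq_iff_dvd.mpr this)

-- pure 2x2 matrix algebra
def pvPMul (A B : Int × Int × Int × Int) : Int × Int × Int × Int :=
  (A.1 * B.1 + A.2.1 * B.2.2.1, A.1 * B.2.1 + A.2.1 * B.2.2.2,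
   A.2.2.1 * B.1 + A.2.2.2 * B.2.2.1, A.2.2.1 * B.2.1 + A.2.2.2 * B.2.2.2)

def pvId : Int × Int × Int × Int := (1, 0, 0, 1)

def pvPPow (B : Int × Int × Int × Int) : Nat → Int × Int × Int × Int
  | 0 => pvId
  | (k + 1) => pvPMul (pvPPow B k) B

-- componentwise congruence of matrices
def pvMEq (p : Int) (A B : Int × Int × Int × Int) : Prop :=
  A.1 ≡ B.1 [ZMOD p] ∧ A.2.1 ≡ B.2.1 [ZMOD p] ∧ A.2.2.1 ≡ B.2.2.1 [ZMOD p] ∧ A.2.2.2 ≡ B.2.2.2 [ZMOD p]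

theorem pvMMul_cong {p : Int} {a A b B : Int × Int × Int × Int}
    (ha : pvMEq p a A) (hb : pvMEq p b B) : pvMEq p (pvMMul a b p) (pvPMul A B) := by
  obtain ⟨ha1, ha2, ha3, ha4⟩ := ha; obtain ⟨hb1, hb2, hb3, hb4⟩ := hb
  refine ⟨?_, ?_, ?_, ?_⟩ <;>
    exact (pvMod_modEq _ _).trans (Int.ModEq.add (Int.ModEq.mul ‹_› ‹_›) (Int.ModEq.mul ‹_› ‹_›))

theorem pvPMul_assoc (A B C : Int × Int × Int × Int) :
    pvPMul (pvPMul A B) C = pvPMul A (pvPMul B C) := by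
  obtain ⟨a1, a2, a3, a4⟩ := A; obtain ⟨b1, b2, b3, b4⟩ := B; obtain ⟨c1, c2, c3, c4⟩ := C
  simp only [pvPMul, Prod.mk.injEq]
  refine ⟨by ring, by ring, by ring, by ring⟩

theorem pvPMul_id_left (A : Int × Int × Int × Int) : pvPMul pvId A = A := by
  obtain ⟨a1, a2, a3, a4⟩ := A
  simp only [pvPMul, pvId, Prod.mk.injEq]
  refine ⟨by ring, by ring, by ring, by ring⟩

theorem pvPMul_id_right (A : Int × Int × Int × Int) : pvPMul A pvId = A := by
  obtain ⟨a1, a2, a3, a4⟩ := A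
  simp only [pvPMul, pvId, Prod.mk.injEq]
  refine ⟨by ring, by ring, by ring, by ring⟩

theorem pvPPow_succ_left (B : Int × Int × Int × Int) (k : Nat) :
    pvPPow B (k + 1) = pvPMul B (pvPPow B k) := by
  induction k with
  | zero => simp [pvPPow, pvPMul_id_left, pvPMul_id_right]
  | succ m ih =>
    calc pvPPow B (m + 2) = pvPMul (pvPPow B (m + 1)) B := rfl
    _ = pvPMul (pvPMul B (pvPPow B m)) B := by rw [ih]
    _ = pvPMul B (pvPMul (pvPPow B m) B) := pvPMul_assoc _ _ _
    _ = pvPMul B (pvPPow B (m + 1)) := rfl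

theorem pvPPow_sq (B : Int × Int × Int × Int) (k : Nat) :
    pvPPow (pvPMul B B) k = pvPPow B (2 * k) := by
  induction k with
  | zero => rfl
  | succ m ih =>
    have : 2 * (m + 1) = 2 * m + 1 + 1 := by ring
    rw [this]
    calc pvPPow (pvPMul B B) (m + 1) = pvPMul (pvPPow (pvPMul B B) m) (pvPMul B B) := rfl
    _ = pvPMul (pvPPow B (2 * m)) (pvPMul B B) := by rw [ih]
    _ = pvPMul (pvPMul (pvPPow B (2 * m)) B) B := (pvPMul_assoc _ _ _).symm
    _ = pvPMul (pvPPow B (2 * m + 1)) B := rfl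
    _ = pvPPow B (2 * m + 1 + 1) := rfl

-- the binary-exponentiation loop computes r * b^e modulo p
theorem pvPowLoop_spec {p : Int} (hp : p ≠ 0) :
    ∀ (fuel : Nat) (e : Int) (r b R B : Int × Int × Int × Int),
      e.toNat ≤ fuel → pvMEq p r R → pvMEq p b B →
      pvMEq p (pvPowLoop p r b e) (pvPMul R (pvPPow B e.toNat)) := by
  intro fuel
  induction fuel with
  | zero =>
    intro e r b R B hfuel hr hb
    have he : e ≤ 0 := by omega
    rw [pvPowLoop, dif_pos he]
    have : e.toNat = 0 := by omega
    rw [this]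
    simpa [pvPPow, pvPMul_id_right] using hr
  | succ f ih =>
    intro e r b R B hfuel hr hb
    by_cases he : e ≤ 0
    · rw [pvPowLoop, dif_pos he]
      have : e.toNat = 0 := by omega
      rw [this]
      simpa [pvPPow, pvPMul_id_right] using hr
    · rw [pvPowLoop, dif_neg he]
      have hepos : 0 < e := by omega
      have hmod : PySem.Int.mod e 2 = e % 2 := PySem.Int.mod_eq_emod_of_pos (by omega)
      have hdiv : PySem.Int.floordiv e 2 = e / 2 := PySem.Int.floordiv_eq_ediv_of_pos (by omega)
      have hfu : (PySem.Int.floordiv e 2).toNat ≤ f := by rw [hdiv]; omega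
      have heq : (PySem.Int.floordiv e 2).toNat = e.toNat / 2 := by rw [hdiv]; omega
      by_cases hodd : e % 2 = 1
      · have hc : (PySem.Int.mod e 2 == 1) = true := by rw [hmod, hodd]; rfl
        simp only [hc, if_true]
        have h1 := ih (PySem.Int.floordiv e 2) (pvMMul r b p) (pvMMul b b p)
          (pvPMul R B) (pvPMul B B) hfu (pvMMul_cong hr hb) (pvMMul_cong hb hb)
        have hsplit : e.toNat = 2 * (e.toNat / 2) + 1 := by omega
        rw [heq, pvPPow_sq] at h1
        have hre : pvPMul (pvPMul R B) (pvPPow B (2 * (e.toNat / 2))) =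
            pvPMul R (pvPPow B e.toNat) := by
          rw [pvPMul_assoc, ← pvPPow_succ_left, ← hsplit]
        rw [← hre]; exact h1
      · have hodd' : e % 2 = 0 := by omega
        have hc : (PySem.Int.mod e 2 == 1) = false := by rw [hmod, hodd']; rfl
        simp only [hc, if_false, Bool.false_eq_true]
        have h1 := ih (PySem.Int.floordiv e 2) r (pvMMul b b p)
          R (pvPMul B B) hfu hr (pvMMul_cong hb hb)
        have hsplit : e.toNat = 2 * (e.toNat / 2) := by omega
        rw [heq, pvPPow_sq, ← hsplit] at h1
        simpa using h1

-- the companion matrix and its action on the seed vector (1, 2) = (D_1, D_0)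
def pvM (x : Int) : Int × Int × Int × Int := (1, -x, 1, 0)

def pvAct (A : Int × Int × Int × Int) : Int × Int :=
  (A.1 * 1 + A.2.1 * 2, A.2.2.1 * 1 + A.2.2.2 * 2)

theorem pvAct_pmul (A B : Int × Int × Int × Int) :
    pvAct (pvPMul A B) = (A.1 * (pvAct B).1 + A.2.1 * (pvAct B).2,
                          A.2.2.1 * (pvAct B).1 + A.2.2.2 * (pvAct B).2) := by
  obtain ⟨a1, a2, a3, a4⟩ := A; obtain ⟨b1, b2, b3, b4⟩ := B
  simp only [pvAct, pvPMul, Prod.mk.injEq]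
  exact ⟨by ring, by ring⟩

theorem pvAct_pow (x : Int) (k : Nat) :
    pvAct (pvPPow (pvM x) k) = (pvD x (k + 1), pvD x k) := by
  induction k with
  | zero => simp [pvPPow, pvAct, pvId, pvD]
  | succ m ih =>
    rw [pvPPow_succ_left, pvAct_pmul, ih]
    simp only [pvM, pvD, Prod.mk.injEq]
    exact ⟨by ring, by ring⟩

-- A's loop as a function iterate, with the state = (D_k mod p, D_{k+1} mod p)
theorem pvIterA_spec {p : Int} (hp : p ≠ 0) (x : Int) (k : Nat) :
    (fun (st : Int × Int) => (st.2, PySem.Int.mod (st.2 - x * st.1) p))^[k]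
      (PySem.Int.mod 2 p, PySem.Int.mod 1 p) =
    (PySem.Int.mod (pvD x k) p, PySem.Int.mod (pvD x (k + 1)) p) := by
  induction k with
  | zero => simp [pvD]
  | succ m ih =>
    rw [Function.iterate_succ_apply', ih]
    refine Prod.ext rfl ?_
    exact pvMod_congr hp (((pvMod_modEq _ _).sub ((Int.ModEq.refl x).mul (pvMod_modEq _ _))).trans
        (by show pvD x (m+1) - x * pvD x m ≡ pvD x (m+2) [ZMOD p]; rw [pvD]))

-- foldl over pyRange 2 (N+1) ignoring the index = iterate
theorem pvFold_iterate {α : Type} (f : α → α) (init : α) (m : Nat) :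
    (PySem.List.pyRange 2 ((m : Int) + 2 + 1) 1).foldl (fun st _ => f st) init =
      f^[m + 1] init := by
  induction m with
  | zero =>
    have h0 : ((0 : Nat) : Int) + 2 + 1 = 2 + 1 := by norm_num
    rw [h0, PySem.List.pyRange_one_succ_right (by norm_num)]
    simp [PySem.List.pyRange]
  | succ k ih =>
    have hc : ((k + 1 : Nat) : Int) + 2 + 1 = ((k : Int) + 2 + 1) + 1 := by push_cast; ring
    rw [hc, PySem.List.pyRange_one_succ_right (by omega), List.foldl_append, ih]
    simp [Function.iterate_succ_apply']

-- B's port equals mod p of the pure sequence, for every n ≠ 0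
theorem pvAlt_eq {p : Int} (hp : p ≠ 0) (n x : Int) (hn : n ≠ 0) :
    reversed_dickson_polynomial_alt n x p = PySem.Int.mod (pvD x ((n - 1).toNat + 1)) p := by
  have hI : pvMEq p (PySem.Int.mod 1 p, 0, 0, PySem.Int.mod 1 p) pvId :=
    ⟨pvMod_modEq 1 p, Int.ModEq.refl 0, Int.ModEq.refl 0, pvMod_modEq 1 p⟩
  have hM : pvMEq p (PySem.Int.mod 1 p, PySem.Int.mod (-x) p, PySem.Int.mod 1 p, 0) (pvM x) :=
    ⟨pvMod_modEq 1 p, pvMod_modEq (-x) p, pvMod_modEq 1 p, Int.ModEq.refl 0⟩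
  have hloop := pvPowLoop_spec hp (n - 1).toNat (n - 1)
    (PySem.Int.mod 1 p, 0, 0, PySem.Int.mod 1 p)
    (PySem.Int.mod 1 p, PySem.Int.mod (-x) p, PySem.Int.mod 1 p, 0)
    pvId (pvM x) le_rfl hI hM
  rw [pvPMul_id_left] at hloop
  obtain ⟨h1, h2, _, _⟩ := hloop
  have hfst : (pvPPow (pvM x) ((n - 1).toNat)).1 * 1 + (pvPPow (pvM x) ((n - 1).toNat)).2.1 * 2 =
      pvD x ((n - 1).toNat + 1) := congrArg Prod.fst (pvAct_pow x ((n - 1).toNat))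
  have hcond : (n == 0) = false := by simp [hn]
  simp only [reversed_dickson_polynomial_alt, hcond, Bool.false_eq_true, if_false]
  rw [← hfst]
  exact pvMod_congr hp (Int.ModEq.add (h1.mul (Int.ModEq.refl 1)) (h2.mul (Int.ModEq.refl 2)))

-- A's port equals mod p of the pure sequence, for n ≥ 2
theorem pvA_eq {p : Int} (hp : p ≠ 0) (x : Int) (m : Nat) :
    reversed_dickson_polynomial ((m : Int) + 2) x p = PySem.Int.mod (pvD x (m + 2)) p := by
  have hc0 : (((m : Int) + 2) == 0) = false := by simp; omega
  have hc1 : (((m : Int) + 2) == 1) = false := by simp; omega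
  simp only [reversed_dickson_polynomial, hc0, hc1, Bool.false_eq_true, if_false]
  rw [pvFold_iterate (fun st => (st.2, PySem.Int.mod (st.2 - x * st.1) p))
    (PySem.Int.mod 2 p, PySem.Int.mod 1 p) m, pvIterA_spec hp x (m + 1)]

-- ===== VERDICT (by name: the statement is the Claim_ definition above) =====
theorem reversed_dickson_polynomial_spec : Claim_equal_reversed_dickson_polynomial := by
  intro n x p _ hp
  show reversed_dickson_polynomial n x p = reversed_dickson_polynomial_alt n x p
  rcases eq_or_ne n 0 with hn0 | hn0
  · subst hn0
    simp [reversed_dickson_polynomial, reversed_dickson_polynomial_alt]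
  rw [pvAlt_eq hp n x hn0]
  rcases eq_or_ne n 1 with hn1 | hn1
  · subst hn1
    norm_num [reversed_dickson_polynomial]
    rfl
  by_cases hlt : n < 0
  · have hnil : PySem.List.pyRange 2 (n + 1) 1 = [] := by
      simp [PySem.List.pyRange]
      omega
    have hc0 : (n == 0) = false := by simp [hn0]
    have hc1 : (n == 1) = false := by simp [hn1]
    simp only [reversed_dickson_polynomial, hc0, hc1, Bool.false_eq_true, if_false, hnil,
      List.foldl_nil]
    rw [show (n - 1).toNat = 0 by omega]
    rfl
  · have h2 : 2 ≤ n := by omega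
    obtain ⟨m, hm⟩ : ∃ m : Nat, n = (m : Int) + 2 := ⟨(n - 2).toNat, by omega⟩
    subst hm
    rw [pvA_eq hp x m, show (((m : Int) + 2) - 1).toNat = m + 1 by omega]
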